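-- pv_equiv track=rewrite | github.com/underscore95/hytale-ui-docs | main.py | get_type_fields
-- ===== SOURCE A (Python) =====
-- def is_line_terminated(s):
--     i = s.find(";")
--     if i == -1:
--         return False
--     return "//" not in s[:i]
--
-- def get_type_fields(lines: list, line_index: int, typeEndIndex: int):
--     line = lines[line_index][typeEndIndex:] # cut off everything before the type on the first line
--     params = ""
--
--     # extract params into a big string
--     for i in range(line_index, len(lines)):
--         if i != line_index:
--             line = lines[i]
--
--         params += line
--
--         if is_line_terminated(line):
--             break
--
--     params = params[:params.rfind(");")] # remove line terminator
--
--     # convert string to dict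
--     currentKey = ""
--     currentVal = ""
--     isKey = True
--     nest = 0
--     fields = {}
--     for c in params:
--         if c == "(":
--             nest += 1
--         if c == ")":
--             nest -= 1
--         if nest == 0:
--             if isKey and c == ":":
--                 isKey = False
--                 continue
--             if not isKey and c == ",":
--                 fields[currentKey] = currentVal
--                 currentKey = ""
--                 currentVal = ""
--                 isKey = True
--                 continue
--         if isKey:
--             currentKey += c
--         else:
--             currentVal += c
--
--     if currentKey != "":
--         fields[currentKey] = currentVal
--
--     # clean up keys and values
--     cleanedFields = {}
--     for k, v in fields.items():
--         k = k.replace("\n", "").strip()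
--         v = v.strip()
--
--         cleanedFields[k] = v
--
--     return cleanedFields
-- ===== SOURCE B (Python) =====
-- def is_line_terminated(s):
--     i = s.find(";")
--     if i == -1:
--         return False
--     return "//" not in s[:i]
--
-- def split_top(s, ch):
--     # split s at the first occurrence of ch that sits at paren depth 0
--     depth = 0
--     for i, c in enumerate(s):
--         if c == '(':
--             depth += 1
--         elif c == ')':
--             depth -= 1
--         elif c == ch and depth == 0:
--             return s[:i], s[i + 1:]
--     return s, None
--
-- def split_fields(s):
--     # recursively cut s into raw (key, value) segments
--     if s == "":
--         return []
--     key, rest = split_top(s, ':')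
--     if rest is None:
--         return [(s, "")]
--     val, tail = split_top(rest, ',')
--     if tail is None:
--         return [(key, val)] if key != "" else []
--     return [(key, val)] + split_fields(tail)
--
-- def get_type_fields(lines: list, line_index: int, typeEndIndex: int):
--     line = lines[line_index][typeEndIndex:]
--     params = ""
--     for i in range(line_index, len(lines)):
--         if i != line_index:
--             line = lines[i]
--         params += line
--         if is_line_terminated(line):
--             break
--     params = params[:params.rfind(");")]
--
--     fields = {}
--     for key, val in split_fields(params):
--         fields[key] = val
--
--     cleaned = {}
--     for k, v in fields.items():
--         cleaned[k.replace("\n", "").strip()] = v.strip()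
--     return cleaned
-- ===== Notes on version B (the rewrite author's own statement) =====
-- stated objective: alternative
-- what changed: Replaces A's single-pass five-variable state machine (key/value accumulators, isKey flag, nest counter, mid-loop dict writes) with a recursive decomposition: a depth-tracking splitter cuts the params string into raw (key, value) segments at top-level ':'/',', and the dict is built from that segment list afterwards; line gathering and the ');' trimming are kept identical.
import Mathlib
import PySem

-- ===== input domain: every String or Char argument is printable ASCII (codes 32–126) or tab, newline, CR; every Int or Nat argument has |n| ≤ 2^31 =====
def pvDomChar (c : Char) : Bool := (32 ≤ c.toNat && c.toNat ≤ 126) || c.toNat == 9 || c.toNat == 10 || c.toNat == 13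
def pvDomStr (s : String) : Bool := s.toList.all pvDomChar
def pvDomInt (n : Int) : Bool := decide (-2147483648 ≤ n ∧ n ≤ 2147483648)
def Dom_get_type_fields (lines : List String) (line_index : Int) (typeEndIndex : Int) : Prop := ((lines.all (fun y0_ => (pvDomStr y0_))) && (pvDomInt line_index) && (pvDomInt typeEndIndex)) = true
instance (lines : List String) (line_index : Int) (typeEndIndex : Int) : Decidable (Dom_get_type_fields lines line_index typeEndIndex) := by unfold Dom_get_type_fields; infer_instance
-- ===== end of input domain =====

-- B re-implements only the params→fields parsing (a recursive segment splitter instead of A's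
-- one-pass state machine); the line gathering, ');'-trimming and cleanup are identical in both
-- programs and are shared helpers below. Equivalence is about the return value; neither mutates.

-- ===== SHARED HELPERS (identical code in Source A and Source B: gathering, trimming, cleanup) =====
-- is_line_terminated(s), on List Char
def pvIsLineTerminated (s : List Char) : Bool :=
  let i := PySem.Chars.find s [';']
  if i == -1 then false
  else !(PySem.Chars.isIn ['/', '/'] (PySem.List.slice s none (some i)))

-- the gathering loop 'for i in range(line_index, len(lines)): … break'
def pvGather (lines : List String) (line_index : Int) (firstLine : List Char) :
    List Int → List Char → List Char
  | [], params => params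
  | i :: is, params =>
      let line := if i != line_index then ((PySem.List.pyGet? lines i).getD "").toList
                  else firstLine
      let params := params ++ line
      if pvIsLineTerminated line then params
      else pvGather lines line_index firstLine is params

-- builds 'params' (after the rfind-trim); none = the IndexError of lines[line_index]
def pvParams (lines : List String) (line_index : Int) (typeEndIndex : Int) : Option (List Char) :=
  match PySem.List.pyGet? lines line_index with
  | none => none
  | some l0 =>
      let firstLine := PySem.List.slice l0.toList (some typeEndIndex) none
      let params := pvGather lines line_index firstLine
        (PySem.List.pyRange line_index ((lines.length : Int)) 1) []
      some (PySem.List.slice params none (some (PySem.Chars.rfind params [')', ';'])))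

-- the cleanup loop over fields.items()
def pvCleanup (fields : PySem.Dict String String) : PySem.Dict String String :=
  fields.items.foldl (fun d kv =>
    d.insert
      (String.ofList (PySem.Chars.strip (PySem.Chars.replace kv.1.toList ['\n'] [])))
      (String.ofList (PySem.Chars.strip kv.2.toList)))
    PySem.Dict.empty

-- ===== PORT A =====
-- A's character state machine: currentKey, currentVal, isKey, nest, fields
def pvParseA : List Char → List Char → List Char → Bool → Int → PySem.Dict String String →
    PySem.Dict String String
  | [], k, v, _, _, f => if k ≠ [] then f.insert (String.ofList k) (String.ofList v) else f
  | c :: cs, k, v, isKey, nest, f =>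
      let nest := if c == '(' then nest + 1 else nest
      let nest := if c == ')' then nest - 1 else nest
      if nest == 0 && isKey && c == ':' then
        pvParseA cs k v false nest f
      else if nest == 0 && !isKey && c == ',' then
        pvParseA cs [] [] true nest (f.insert (String.ofList k) (String.ofList v))
      else if isKey then pvParseA cs (k ++ [c]) v isKey nest f
      else pvParseA cs k (v ++ [c]) isKey nest f

def get_type_fields (lines : List String) (line_index : Int) (typeEndIndex : Int) :
    List (String × String) :=
  match pvParams lines line_index typeEndIndex with
  | none => []   -- A raises IndexError here; excluded by Pre_
  | some params =>
      (pvCleanup (pvParseA params [] [] true 0 PySem.Dict.empty)).items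

-- ===== PORT B =====
-- split_top(s, ch): cut at the first ch at paren depth 0 (depth is the loop-local variable)
def pvSplitTop (ch : Char) : List Char → Int → (List Char × Option (List Char))
  | [], _ => ([], none)
  | c :: cs, depth =>
      if c == '(' then
        let r := pvSplitTop ch cs (depth + 1); (c :: r.1, r.2)
      else if c == ')' then
        let r := pvSplitTop ch cs (depth - 1); (c :: r.1, r.2)
      else if c == ch && depth == 0 then ([], some cs)
      else
        let r := pvSplitTop ch cs depth; (c :: r.1, r.2)

theorem pvSplitTop_some_length (ch : Char) :
    ∀ (s : List Char) (d : Int) (r : List Char),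
      (pvSplitTop ch s d).2 = some r → r.length < s.length := by
  intro s
  induction s with
  | nil => intro d r h; simp [pvSplitTop] at h
  | cons c cs ih =>
      intro d r h
      simp only [pvSplitTop] at h
      split_ifs at h with h1 h2 h3
      · exact Nat.lt_succ_of_lt (ih _ _ h)
      · exact Nat.lt_succ_of_lt (ih _ _ h)
      · cases h; simp
      · exact Nat.lt_succ_of_lt (ih _ _ h)

-- split_fields(s): raw (key, value) segments
def pvSplitFields (s : List Char) : List (List Char × List Char) :=
  if hs : s = [] then []
  else
    match h1 : pvSplitTop ':' s 0 with
    | (_, none) => [(s, [])]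
    | (key, some rest) =>
        match h2 : pvSplitTop ',' rest 0 with
        | (val, none) => if key ≠ [] then [(key, val)] else []
        | (val, some tail) => (key, val) :: pvSplitFields tail
termination_by s.length
decreasing_by
  have hr : rest.length < s.length := pvSplitTop_some_length ':' s 0 rest (by rw [h1])
  have ht : tail.length < rest.length := pvSplitTop_some_length ',' rest 0 tail (by rw [h2])
  omega

def get_type_fields_alt (lines : List String) (line_index : Int) (typeEndIndex : Int) :
    List (String × String) :=
  match pvParams lines line_index typeEndIndex with
  | none => []
  | some params =>
      let fields := (pvSplitFields params).foldl
        (fun d kv => d.insert (String.ofList kv.1) (String.ofList kv.2)) PySem.Dict.empty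
      (pvCleanup fields).items

-- ===== PRECONDITION & SPEC =====
-- Pre_ excludes exactly the inputs where lines[line_index] raises IndexError.
def Pre_get_type_fields (lines : List String) (line_index : Int) (typeEndIndex : Int) : Prop :=
  -(lines.length : Int) ≤ line_index ∧ line_index < (lines.length : Int)
instance (lines : List String) (line_index : Int) (typeEndIndex : Int) : Decidable (Pre_get_type_fields lines line_index typeEndIndex) := by unfold Pre_get_type_fields; infer_instance

def pvWitness_get_type_fields : List String × Int × Int := (["name(x: int,", "y: str);"], 0, 4)

def Spec_get_type_fields (lines : List String) (line_index : Int) (typeEndIndex : Int) (out : List (String × String)) : Prop := out = get_type_fields_alt lines line_index typeEndIndex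
instance (lines : List String) (line_index : Int) (typeEndIndex : Int) (out : List (String × String)) : Decidable (Spec_get_type_fields lines line_index typeEndIndex out) := by unfold Spec_get_type_fields; infer_instance

-- ===== CLAIM (what is proved, stated in full; the proofs are below) =====
def Claim_equal_get_type_fields : Prop := ∀ (lines : List String) (line_index : Int) (typeEndIndex : Int), Dom_get_type_fields lines line_index typeEndIndex → Pre_get_type_fields lines line_index typeEndIndex → Spec_get_type_fields lines line_index typeEndIndex (get_type_fields lines line_index typeEndIndex)

-- ===== LEMMAS AND PROOFS =====

theorem pvSplitTop_none_eq (ch : Char) :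
    ∀ (s : List Char) (d : Int), (pvSplitTop ch s d).2 = none → (pvSplitTop ch s d).1 = s := by
  intro s
  induction s with
  | nil => intro d _; simp [pvSplitTop]
  | cons c cs ih =>
      intro d h
      simp only [pvSplitTop] at h ⊢
      split_ifs at h ⊢ <;> simp_all

-- A's loop in key mode follows B's colon splitter
theorem pvParseA_keyPhase :
    ∀ (cs k : List Char) (nest : Int) (f : PySem.Dict String String),
      pvParseA cs k [] true nest f =
        match pvSplitTop ':' cs nest with
        | (pre, none) =>
            if k ++ pre ≠ [] then f.insert (String.ofList (k ++ pre)) (String.ofList []) else f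
        | (pre, some rest) => pvParseA rest (k ++ pre) [] false 0 f := by
  intro cs
  induction cs with
  | nil => intro k nest f; simp [pvParseA, pvSplitTop]
  | cons c cs ih =>
      intro k nest f
      by_cases hop : c = '('
      · subst hop
        simp [pvParseA, pvSplitTop]
        rw [ih (k ++ ['(']) (nest + 1) f]
        cases h : pvSplitTop ':' cs (nest + 1) with
        | mk pre rest? => cases rest? <;> simp
      · by_cases hcl : c = ')'
        · subst hcl
          simp [pvParseA, pvSplitTop]
          rw [ih (k ++ [')']) (nest - 1) f]
          cases h : pvSplitTop ':' cs (nest - 1) with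
          | mk pre rest? => cases rest? <;> simp
        · by_cases hco : c = ':' ∧ nest = 0
          · obtain ⟨rfl, rfl⟩ := hco
            simp [pvParseA, pvSplitTop]
          · have hx : ¬(nest = 0 ∧ c = ':') := fun hh => hco ⟨hh.2, hh.1⟩
            have hx' : ¬(c = ':' ∧ nest = 0) := fun hh => hco hh
            simp [pvParseA, pvSplitTop, hop, hcl, hx, hx']
            rw [ih (k ++ [c]) nest f]
            cases h : pvSplitTop ':' cs nest with
            | mk pre rest? => cases rest? <;> simp

-- A's loop in value mode follows B's comma splitter
theorem pvParseA_valPhase :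
    ∀ (cs k v : List Char) (nest : Int) (f : PySem.Dict String String),
      pvParseA cs k v false nest f =
        match pvSplitTop ',' cs nest with
        | (val, none) =>
            if k ≠ [] then f.insert (String.ofList k) (String.ofList (v ++ val)) else f
        | (val, some tail) =>
            pvParseA tail [] [] true 0 (f.insert (String.ofList k) (String.ofList (v ++ val))) := by
  intro cs
  induction cs with
  | nil => intro k v nest f; simp [pvParseA, pvSplitTop]
  | cons c cs ih =>
      intro k v nest f
      by_cases hop : c = '('
      · subst hop
        simp [pvParseA, pvSplitTop]
        rw [ih k (v ++ ['(']) (nest + 1) f]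
        cases h : pvSplitTop ',' cs (nest + 1) with
        | mk val tail? => cases tail? <;> simp
      · by_cases hcl : c = ')'
        · subst hcl
          simp [pvParseA, pvSplitTop]
          rw [ih k (v ++ [')']) (nest - 1) f]
          cases h : pvSplitTop ',' cs (nest - 1) with
          | mk val tail? => cases tail? <;> simp
        · by_cases hco : c = ',' ∧ nest = 0
          · obtain ⟨rfl, rfl⟩ := hco
            simp [pvParseA, pvSplitTop]
          · have hx : ¬(nest = 0 ∧ c = ',') := fun hh => hco ⟨hh.2, hh.1⟩
            have hx' : ¬(c = ',' ∧ nest = 0) := fun hh => hco hh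
            simp [pvParseA, pvSplitTop, hop, hcl, hx, hx']
            rw [ih k (v ++ [c]) nest f]
            cases h : pvSplitTop ',' cs nest with
            | mk val tail? => cases tail? <;> simp

-- the shape of pvSplitFields under each splitter outcome
theorem pvSplitFields_none (s key : List Char) (hs : s ≠ [])
    (h1 : pvSplitTop ':' s 0 = (key, none)) : pvSplitFields s = [(s, [])] := by
  rw [pvSplitFields, dif_neg hs]
  split
  · rfl
  · rename_i key' rest' heq
    rw [h1] at heq
    simp at heq

theorem pvSplitFields_some_none (s key rest val : List Char) (hs : s ≠ [])
    (h1 : pvSplitTop ':' s 0 = (key, some rest)) (h2 : pvSplitTop ',' rest 0 = (val, none)) :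
    pvSplitFields s = if key ≠ [] then [(key, val)] else [] := by
  rw [pvSplitFields, dif_neg hs]
  split
  · rename_i key' heq
    rw [h1] at heq
    simp at heq
  · rename_i key' rest' heq
    rw [h1] at heq
    simp only [Prod.mk.injEq, Option.some.injEq] at heq
    obtain ⟨hk, hr⟩ := heq
    subst hk; subst hr
    split
    · rename_i val' heq2
      rw [h2] at heq2
      simp only [Prod.mk.injEq] at heq2
      rw [heq2.1]
    · rename_i val' tail' heq2
      rw [h2] at heq2
      simp at heq2

theorem pvSplitFields_some_some (s key rest val tail : List Char) (hs : s ≠ [])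
    (h1 : pvSplitTop ':' s 0 = (key, some rest)) (h2 : pvSplitTop ',' rest 0 = (val, some tail)) :
    pvSplitFields s = (key, val) :: pvSplitFields tail := by
  rw [pvSplitFields, dif_neg hs]
  split
  · rename_i key' heq
    rw [h1] at heq
    simp at heq
  · rename_i key' rest' heq
    rw [h1] at heq
    simp only [Prod.mk.injEq, Option.some.injEq] at heq
    obtain ⟨hk, hr⟩ := heq
    subst hk; subst hr
    split
    · rename_i val' heq2
      rw [h2] at heq2
      simp at heq2
    · rename_i val' tail' heq2
      rw [h2] at heq2
      simp only [Prod.mk.injEq, Option.some.injEq] at heq2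
      rw [heq2.1, heq2.2]

-- the state machine computes the dict of B's segments
theorem pvParseA_eq_splitFields :
    ∀ (s : List Char) (f : PySem.Dict String String),
      pvParseA s [] [] true 0 f =
        (pvSplitFields s).foldl
          (fun d kv => d.insert (String.ofList kv.1) (String.ofList kv.2)) f := by
  intro s
  induction s using pvSplitFields.induct with
  | case1 =>
      intro f
      rw [pvSplitFields]
      simp [pvParseA]
  | case2 s hs key h1 =>
      intro f
      have hkey : key = s := by
        have h := pvSplitTop_none_eq ':' s 0 (by rw [h1])
        rw [h1] at h; exact h
      rw [pvParseA_keyPhase s [] 0 f, h1, pvSplitFields_none s key hs h1]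
      subst hkey
      simp [hs]
  | case3 s hs key rest h1 val h2 hkey =>
      intro f
      rw [pvParseA_keyPhase s [] 0 f, h1]
      simp only [List.nil_append]
      rw [pvParseA_valPhase rest key [] 0 f, h2]
      rw [pvSplitFields_some_none s key rest val hs h1 h2]
      simp [hkey]
  | case4 s hs key rest h1 val h2 hkey =>
      intro f
      rw [pvParseA_keyPhase s [] 0 f, h1]
      simp only [List.nil_append]
      rw [pvParseA_valPhase rest key [] 0 f, h2]
      rw [pvSplitFields_some_none s key rest val hs h1 h2]
      simp [hkey]
  | case5 s hs key rest h1 val tail h2 ih =>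
      intro f
      rw [pvParseA_keyPhase s [] 0 f, h1]
      simp only [List.nil_append]
      rw [pvParseA_valPhase rest key [] 0 f, h2]
      rw [pvSplitFields_some_some s key rest val tail hs h1 h2]
      simp only [List.nil_append, List.foldl_cons]
      exact ih _

-- ===== VERDICT (by name: the statement is the Claim_ definition above) =====
theorem get_type_fields_spec : Claim_equal_get_type_fields := by
  intro lines line_index typeEndIndex _hdom _hpre
  unfold Spec_get_type_fields get_type_fields get_type_fields_alt
  cases h : pvParams lines line_index typeEndIndex with
  | none => rfl
  | some params => simp [pvParseA_eq_splitFields]
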